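-- pv_equiv track=rewrite | github.com/openxjarvis/clawdbot-python | openclaw/agents/context_pruning.py | _take_tail_from_joined_text
-- ===== SOURCE A (Python) =====
-- def _take_tail_from_joined_text(parts: list[str], max_chars: int) -> str:
--     """Take the tail portion across joined text blocks."""
--     if max_chars <= 0 or not parts:
--         return ""
--     remaining = max_chars
--     out: list[str] = []
--     for i in range(len(parts) - 1, -1, -1):
--         p = parts[i]
--         if len(p) <= remaining:
--             out.append(p)
--             remaining -= len(p)
--         else:
--             out.append(p[len(p) - remaining:])
--             remaining = 0
--             break
--         if remaining > 0 and i > 0: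
--             out.append("\n")
--             remaining -= 1
--     out.reverse()
--     return "".join(out)
-- ===== SOURCE B (Python) =====
-- def _take_tail_from_joined_text(parts: list[str], max_chars: int) -> str:
--     """Take the tail portion across joined text blocks."""
--     if max_chars <= 0 or not parts:
--         return ""
--     return "\n".join(parts)[-max_chars:]
-- ===== Notes on version B (the rewrite author's own statement) =====
-- stated objective: simpler
-- what changed: B joins all parts with '\n' once and takes the last max_chars characters with a single negative slice, instead of walking the parts backwards while charging part lengths and separators against a remaining budget.
import Mathlib
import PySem

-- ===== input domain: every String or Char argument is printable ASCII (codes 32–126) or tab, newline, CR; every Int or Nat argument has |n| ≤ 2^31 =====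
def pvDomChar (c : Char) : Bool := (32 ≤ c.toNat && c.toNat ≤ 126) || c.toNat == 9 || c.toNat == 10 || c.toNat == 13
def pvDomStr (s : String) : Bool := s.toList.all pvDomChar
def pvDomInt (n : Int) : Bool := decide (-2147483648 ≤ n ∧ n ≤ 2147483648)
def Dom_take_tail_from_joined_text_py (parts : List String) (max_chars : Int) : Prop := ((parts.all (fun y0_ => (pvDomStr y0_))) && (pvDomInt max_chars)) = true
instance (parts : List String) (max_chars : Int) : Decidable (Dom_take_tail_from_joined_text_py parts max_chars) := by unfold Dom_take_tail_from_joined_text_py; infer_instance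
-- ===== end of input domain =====

-- B replaces A's backwards budget-charging walk by one join + one negative slice (objective: simpler).

-- ===== PORT A =====
-- A's loop 'for i in range(len(parts)-1, -1, -1)' walks the parts from the end; it is
-- transliterated as structural recursion over parts.reverse ('i > 0' ⇔ elements remain, i.e. rest ≠ []).
-- The accumulator 'out' is the returned list (pieces in the order A appends them).
def pvGoA_take_tail (rev : List String) (remaining : Int) : List String :=
  match rev with
  | [] => []
  | p :: rest =>
    if PySem.Str.len p ≤ remaining then
      -- out.append(p); remaining -= len(p)
      if remaining - PySem.Str.len p > 0 ∧ rest ≠ [] then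
        -- out.append("\n"); remaining -= 1
        p :: "\n" :: pvGoA_take_tail rest (remaining - PySem.Str.len p - 1)
      else
        p :: pvGoA_take_tail rest (remaining - PySem.Str.len p)
    else
      -- out.append(p[len(p) - remaining:]); break
      [PySem.Str.slice p (some (PySem.Str.len p - remaining)) none]

def take_tail_from_joined_text_py (parts : List String) (max_chars : Int) : String :=
  if max_chars ≤ 0 ∨ parts = [] then ""
  else PySem.Str.join "" ((pvGoA_take_tail parts.reverse max_chars).reverse)

-- ===== PORT B =====
def take_tail_from_joined_text_py_alt (parts : List String) (max_chars : Int) : String :=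
  if max_chars ≤ 0 ∨ parts = [] then ""
  else PySem.Str.slice (PySem.Str.join "\n" parts) (some (-max_chars)) none

-- ===== PRECONDITION & SPEC =====
def Spec_take_tail_from_joined_text_py (parts : List String) (max_chars : Int) (out : String) : Prop := out = take_tail_from_joined_text_py_alt parts max_chars
instance (parts : List String) (max_chars : Int) (out : String) : Decidable (Spec_take_tail_from_joined_text_py parts max_chars out) := by unfold Spec_take_tail_from_joined_text_py; infer_instance

-- ===== CLAIM (what is proved, stated in full; the proofs are below) =====
def Claim_equal_take_tail_from_joined_text_py : Prop := ∀ (parts : List String) (max_chars : Int), Dom_take_tail_from_joined_text_py parts max_chars → Spec_take_tail_from_joined_text_py parts max_chars (take_tail_from_joined_text_py parts max_chars)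

-- ===== LEMMAS AND PROOFS =====

-- the last n characters of cs (Nat subtraction clamps: n ≥ length gives all of cs)
def pvTakeLast (n : Nat) (cs : List Char) : List Char := cs.drop (cs.length - n)

theorem pvTakeLast_of_le (n : Nat) (cs : List Char) (h : cs.length ≤ n) : pvTakeLast n cs = cs := by
  simp [pvTakeLast, Nat.sub_eq_zero_of_le h]

theorem pvTakeLast_append_add (m : Nat) (xs ys : List Char) :
    pvTakeLast (m + ys.length) (xs ++ ys) = pvTakeLast m xs ++ ys := by
  unfold pvTakeLast
  have h : (xs ++ ys).length - (m + ys.length) = xs.length - m := by simp; omega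
  rw [h, List.drop_append_of_le_length (by omega)]

theorem pvTakeLast_append_le (n : Nat) (xs ys : List Char) (h : n ≤ ys.length) :
    pvTakeLast n (xs ++ ys) = pvTakeLast n ys := by
  unfold pvTakeLast
  have h2 : (xs ++ ys).length - n = xs.length + (ys.length - n) := by simp; omega
  rw [h2, List.drop_append]
  simp

theorem pvJoin_empty (l : List (List Char)) : PySem.Chars.join [] l = l.flatten := by
  induction l with
  | nil => simp [PySem.Chars.join_nil]
  | cons a t ih =>
    cases t with
    | nil => simp [PySem.Chars.join_singleton]
    | cons b u => rw [PySem.Chars.join_cons_cons]; simp at ih ⊢; simpa using ih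

theorem pvJoin_snoc (sep x : List Char) (l : List (List Char)) (h : l ≠ []) :
    PySem.Chars.join sep (l ++ [x]) = PySem.Chars.join sep l ++ sep ++ x := by
  induction l with
  | nil => exact absurd rfl h
  | cons a t ih =>
    cases t with
    | nil => simp [PySem.Chars.join_cons_cons, PySem.Chars.join_singleton]
    | cons b u =>
      rw [show a :: b :: u ++ [x] = a :: (b :: (u ++ [x])) by simp,
        PySem.Chars.join_cons_cons, show b :: (u ++ [x]) = (b :: u) ++ [x] by simp,
        ih (by simp), PySem.Chars.join_cons_cons]
      simp

-- with remaining = 0 every piece A still appends is the empty string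
theorem pvGoA_zero (rev : List String) : ∀ s ∈ pvGoA_take_tail rev 0, s.toList = [] := by
  induction rev with
  | nil => simp [pvGoA_take_tail]
  | cons p rest ih =>
    intro s hs
    have hlen := PySem.Str.len_eq p
    by_cases hp : PySem.Str.len p ≤ 0
    · have hplen : p.toList = [] := List.eq_nil_of_length_eq_zero (by omega)
      simp only [pvGoA_take_tail, if_pos hp] at hs
      have hcond : ¬ ((0 : Int) - PySem.Str.len p > 0 ∧ rest ≠ []) := by
        rintro ⟨h1, -⟩; omega
      rw [if_neg hcond] at hs
      rcases List.mem_cons.mp hs with rfl | hs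
      · exact hplen
      · have hz : (0 : Int) - PySem.Str.len p = 0 := by
          have : p.toList.length = 0 := by simp [hplen]
          omega
        rw [hz] at hs
        exact ih s hs
    · simp only [pvGoA_take_tail, if_neg hp] at hs
      rcases List.mem_singleton.mp hs with rfl
      rw [PySem.Str.toList_slice]
      simp only [PySem.Chars.slice_eq_listSlice]
      rw [PySem.List.slice_from p.toList (by omega : (0:Int) ≤ PySem.Str.len p - 0)]
      apply List.drop_eq_nil_of_le
      omega

-- main invariant: joining A's collected pieces yields the last `remaining` chars of the joined suffix
theorem pvGoA_spec (rev : List String) : ∀ (r : Int), 0 ≤ r →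
    ((pvGoA_take_tail rev r).reverse.map String.toList).flatten
      = pvTakeLast r.toNat (PySem.Chars.join ['\n'] (rev.reverse.map String.toList)) := by
  induction rev with
  | nil => intro r _; simp [pvGoA_take_tail, PySem.Chars.join_nil, pvTakeLast]
  | cons p rest ih =>
    intro r hr
    have hlen := PySem.Str.len_eq p
    have hJ : PySem.Chars.join ['\n'] ((p :: rest).reverse.map String.toList)
        = if rest = [] then p.toList
          else PySem.Chars.join ['\n'] (rest.reverse.map String.toList) ++ ['\n'] ++ p.toList := by
      split_ifs with hrest
      · subst hrest; simp [PySem.Chars.join_singleton]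
      · rw [List.reverse_cons, List.map_append]
        simp only [List.map_cons, List.map_nil]
        rw [pvJoin_snoc _ _ _ (by simpa using hrest)]
    by_cases hp : PySem.Str.len p ≤ r
    · by_cases hc : r - PySem.Str.len p > 0 ∧ rest ≠ []
      · -- part fits, newline charged, loop continues
        obtain ⟨hpos, hrest⟩ := hc
        simp only [pvGoA_take_tail, if_pos hp, if_pos (And.intro hpos hrest)]
        rw [hJ, if_neg hrest]
        have ihr := ih (r - PySem.Str.len p - 1) (by omega)
        simp only [List.reverse_cons, List.map_append, List.flatten_append, List.append_assoc]
        rw [ihr]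
        have harith : r.toNat = (r - PySem.Str.len p - 1).toNat + (('\n') :: p.toList).length := by
          rw [List.length_cons]; omega
        have hadd := pvTakeLast_append_add (r - PySem.Str.len p - 1).toNat
          (PySem.Chars.join ['\n'] (rest.reverse.map String.toList)) ('\n' :: p.toList)
        rw [harith, ← List.append_assoc, List.singleton_append, hadd]
        simp
      · -- part fits; either last part or budget exhausted exactly
        simp only [pvGoA_take_tail, if_pos hp, if_neg hc]
        by_cases hrest : rest = []
        · subst hrest
          simp only [List.reverse_cons, List.reverse_nil, List.nil_append, List.map_cons,
            List.map_nil, PySem.Chars.join_singleton]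
          rw [pvTakeLast_of_le _ _ (by omega)]
          simp [pvGoA_take_tail]
        · have hz : r - PySem.Str.len p = 0 := by
            rcases not_and_or.mp hc with h1 | h2
            · omega
            · exact absurd hrest h2
          rw [hJ, if_neg hrest, hz]
          have hnil : ((pvGoA_take_tail rest 0).reverse.map String.toList).flatten = [] := by
            apply List.flatten_eq_nil_iff.mpr
            intro l hl
            simp only [List.mem_map, List.mem_reverse] at hl
            obtain ⟨s, hs, rfl⟩ := hl
            exact pvGoA_zero rest s hs
          simp only [List.reverse_cons, List.map_append, List.flatten_append]
          rw [hnil]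
          have hrn : r.toNat = p.toList.length := by omega
          rw [hrn, pvTakeLast_append_le _ _ _ (le_refl _)]
          simp [pvTakeLast]
    · -- part longer than the budget: take its tail and stop
      simp only [pvGoA_take_tail, if_neg hp]
      have hslice : (PySem.Str.slice p (some (PySem.Str.len p - r)) none).toList
          = pvTakeLast r.toNat p.toList := by
        rw [PySem.Str.toList_slice]
        simp only [PySem.Chars.slice_eq_listSlice]
        rw [PySem.List.slice_from p.toList (by omega : (0:Int) ≤ PySem.Str.len p - r)]
        unfold pvTakeLast
        congr 1
        omega
      have htail : pvTakeLast r.toNat ('\n' :: p.toList) = pvTakeLast r.toNat p.toList := by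
        unfold pvTakeLast
        have h1 : ('\n' :: p.toList).length - r.toNat = (p.toList.length - r.toNat) + 1 := by
          rw [List.length_cons]; omega
        rw [h1, List.drop_succ_cons]
      rw [hJ]
      split_ifs with hrest
      · simpa using hslice
      · rw [List.append_assoc, pvTakeLast_append_le _ _ _ (by rw [List.singleton_append, List.length_cons]; omega)]
        simp only [List.singleton_append]
        rw [htail]
        simpa using hslice

-- ===== VERDICT (by name: the statement is the Claim_ definition above) =====
theorem take_tail_from_joined_text_py_spec : Claim_equal_take_tail_from_joined_text_py := by
  intro parts max_chars _
  unfold Spec_take_tail_from_joined_text_py take_tail_from_joined_text_py take_tail_from_joined_text_py_alt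
  by_cases h : max_chars ≤ 0 ∨ parts = []
  · rw [if_pos h, if_pos h]
  · rw [if_neg h, if_neg h]
    have hpos : 0 < max_chars := by
      by_contra hq
      exact h (Or.inl (by omega))
    apply String.toList_injective
    rw [PySem.Str.toList_join, PySem.Str.toList_slice]
    simp only [PySem.Chars.slice_eq_listSlice]
    have hmc : -max_chars = -((max_chars.toNat : Nat) : Int) := by omega
    rw [hmc, PySem.List.slice_some_none,
      PySem.List.clampIdx_neg_natCast _ _ (by omega)]
    have hA : PySem.Chars.join "".toList
        (List.map String.toList (pvGoA_take_tail parts.reverse max_chars).reverse)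
        = ((pvGoA_take_tail parts.reverse max_chars).reverse.map String.toList).flatten := by
      rw [show ("" : String).toList = [] from rfl, pvJoin_empty]
    rw [hA, pvGoA_spec parts.reverse max_chars (by omega)]
    simp only [List.reverse_reverse]
    rw [PySem.Str.toList_join]
    rfl
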